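-- pv_equiv track=rewrite | github.com/huigoing/algorithm | 程序员面试宝典/20.高度最小BST.py | solution
-- ===== SOURCE A (Python) =====
-- def solution(data):
--      l=len(data)
--      if l<=2:
--           return l
--      left=0
--      right=l
--      mid=(left+right)//2
--      p=solution(data[:mid])
--      q=solution(data[mid+1:])
--      if p>q:
--           return p+1
--      else:
--           return q+1
-- ===== SOURCE B (Python) =====
-- def solution(data):
--     # Height of the minimal-height BST built from the array depends only on its
--     # length n and equals n.bit_length(): f(n) = n for n <= 2, else 1 + f(n // 2).
--     return len(data).bit_length()
-- ===== Notes on version B (the rewrite author's own statement) =====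
-- stated objective: faster
-- what changed: Replaced the recursive divide-and-conquer over list slices by the closed form bit_length of the list's length, since the result depends only on len(data).
import Mathlib
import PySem

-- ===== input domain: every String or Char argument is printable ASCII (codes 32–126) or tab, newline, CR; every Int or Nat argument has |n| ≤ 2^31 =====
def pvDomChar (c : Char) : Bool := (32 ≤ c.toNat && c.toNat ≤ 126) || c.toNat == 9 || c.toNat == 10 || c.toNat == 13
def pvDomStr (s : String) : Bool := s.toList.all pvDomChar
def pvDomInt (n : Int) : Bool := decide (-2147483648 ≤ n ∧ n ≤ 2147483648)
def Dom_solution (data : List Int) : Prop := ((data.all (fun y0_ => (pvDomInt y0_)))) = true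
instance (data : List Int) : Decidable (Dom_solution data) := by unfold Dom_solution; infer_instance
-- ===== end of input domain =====

-- B replaces A's recursive divide-and-conquer over list slices by the closed form
-- bit_length(len(data)), since A's value depends only on the length; asymptotically faster.


-- ===== PORT A =====
-- mid = (0 + l) // 2 as a natural-number cast (cited by the port's decreasing_by)
theorem mid_cast (m : Nat) : PySem.Int.floordiv (0 + (m : Int)) 2 = ((m / 2 : Nat) : Int) := by
  rw [zero_add]
  exact_mod_cast PySem.Int.floordiv_natCast m 2

def solution (data : List Int) : Int :=
  let l : Int := data.length
  if l ≤ 2 then l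
  else
    let left : Int := 0
    let right : Int := l
    let mid : Int := PySem.Int.floordiv (left + right) 2
    let p := solution (PySem.List.slice data none (some mid))
    let q := solution (PySem.List.slice data (some (mid + 1)) none)
    if p > q then p + 1 else q + 1
termination_by data.length
decreasing_by
  · rw [mid_cast, PySem.List.slice_to_natCast]
    simp only [List.length_take]
    omega
  · rw [mid_cast]
    rw [show ((data.length / 2 : Nat) : Int) + 1 = (((data.length / 2 + 1 : Nat)) : Int) by push_cast; ring]
    rw [PySem.List.slice_from_natCast]
    simp only [List.length_drop]
    omega

-- ===== PORT B =====
def solution_alt (data : List Int) : Int :=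
  ((PySem.Int.bitLength ((data.length : Int))) : Int)

-- ===== PRECONDITION & SPEC =====
def Spec_solution (data : List Int) (out : Int) : Prop := out = solution_alt data
instance (data : List Int) (out : Int) : Decidable (Spec_solution data out) := by unfold Spec_solution; infer_instance

-- ===== CLAIM (what is proved, stated in full; the proofs are below) =====
def Claim_equal_solution : Prop := ∀ (data : List Int), Dom_solution data → Spec_solution data (solution data)

-- ===== LEMMAS AND PROOFS =====

-- bitLength is monotone on natural casts
theorem blen_mono : ∀ n m : Nat, m ≤ n →
    PySem.Int.bitLength ((m : Int)) ≤ PySem.Int.bitLength ((n : Int)) := by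
  intro n
  induction n using Nat.strong_induction_on with
  | _ n ih =>
    intro m hmn
    by_cases hm : m = 0
    · subst hm; simp [PySem.Int.bitLength_zero]
    · have hn : 0 < n := by omega
      rw [PySem.Int.bitLength_natCast (m := m) (by omega),
          PySem.Int.bitLength_natCast (m := n) hn]
      have := ih (n / 2) (by omega) (m / 2) (Nat.div_le_div_right hmn)
      omega

-- A computes the bit length of the input's length
theorem sol_eq : ∀ (n : Nat) (data : List Int), data.length = n →
    solution data = ((PySem.Int.bitLength ((data.length : Int))) : Int) := by
  intro n
  induction n using Nat.strong_induction_on with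
  | _ n ih =>
    intro data hlen
    rw [solution]
    by_cases hle : data.length ≤ 2
    · have hle' : ((data.length : Int)) ≤ 2 := by exact_mod_cast hle
      simp only [hle', if_true]
      have h2 : data.length = 0 ∨ data.length = 1 ∨ data.length = 2 := by omega
      rcases h2 with h | h | h <;> rw [h] <;> decide
    · have hle' : ¬ ((data.length : Int)) ≤ 2 := by exact_mod_cast hle
      simp only [hle', if_false]
      have hpos : 3 ≤ data.length := by omega
      rw [mid_cast]
      rw [PySem.List.slice_to_natCast]
      rw [show ((data.length / 2 : Nat) : Int) + 1 = (((data.length / 2 + 1 : Nat)) : Int) by push_cast; ring]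
      rw [PySem.List.slice_from_natCast]
      have hlen_take : (data.take (data.length / 2)).length = data.length / 2 := by
        simp only [List.length_take]; omega
      have hlen_drop : (data.drop (data.length / 2 + 1)).length =
          data.length - (data.length / 2 + 1) := by
        simp only [List.length_drop]
      have hp := ih (data.length / 2) (by omega) (data.take (data.length / 2)) hlen_take
      have hq := ih (data.length - (data.length / 2 + 1)) (by omega)
        (data.drop (data.length / 2 + 1)) hlen_drop
      rw [hp, hq, hlen_take, hlen_drop]
      have hmono := blen_mono (data.length / 2) (data.length - (data.length / 2 + 1)) (by omega)
      have hhalf : PySem.Int.bitLength ((data.length : Int)) =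
          PySem.Int.bitLength (((data.length / 2 : Nat) : Int)) + 1 :=
        PySem.Int.bitLength_natCast (by omega)
      split_ifs with hpq
      · omega
      · omega

-- ===== VERDICT (by name: the statement is the Claim_ definition above) =====
theorem solution_spec : Claim_equal_solution := by
  intro data _
  unfold Spec_solution solution_alt
  exact sol_eq data.length data rfl
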